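-- pv_equiv track=rewrite | github.com/Lab-CORO/IKDH | tools/compute_jacobian.py | _remove_existing_jacobian
-- ===== SOURCE A (Python) =====
-- def _remove_existing_jacobian(content):
--     """Strip any existing 'jacobian:' block from the file content."""
--     lines = content.splitlines()
--     result, skip = [], False
--     for line in lines:
--         if line.startswith('jacobian:'):
--             skip = True
--             continue
--         if skip and line and not line.startswith(' '):
--             skip = False
--         if not skip:
--             result.append(line)
--     # Remove trailing blank lines
--     while result and not result[-1].strip():
--         result.pop()
--     return '\n'.join(result)
-- ===== SOURCE B (Python) =====
-- def _remove_existing_jacobian(content):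
--     """Strip any existing 'jacobian:' block from the file content."""
--     lines = content.splitlines()
--     result = []
--     i, n = 0, len(lines)
--     while i < n:
--         if lines[i].startswith('jacobian:'):
--             # consume the header line plus its blank/indented continuation lines
--             i += 1
--             while i < n and (not lines[i] or lines[i].startswith(' ')):
--                 i += 1
--         else:
--             result.append(lines[i])
--             i += 1
--     # drop trailing blank lines
--     k = len(result)
--     while k > 0 and not result[k - 1].strip():
--         k -= 1
--     return '\n'.join(result[:k])
-- ===== Notes on version B (the rewrite author's own statement) =====
-- stated objective: alternative
-- what changed: Replaces A's carried skip-flag state machine (a flag threaded through every line plus a pop-while loop on the result) with an index-driven loop that, on a 'jacobian:' header, consumes the whole blank/indented continuation block in an inner loop, and trims trailing blanks by counting from the end and slicing.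
import Mathlib
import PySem

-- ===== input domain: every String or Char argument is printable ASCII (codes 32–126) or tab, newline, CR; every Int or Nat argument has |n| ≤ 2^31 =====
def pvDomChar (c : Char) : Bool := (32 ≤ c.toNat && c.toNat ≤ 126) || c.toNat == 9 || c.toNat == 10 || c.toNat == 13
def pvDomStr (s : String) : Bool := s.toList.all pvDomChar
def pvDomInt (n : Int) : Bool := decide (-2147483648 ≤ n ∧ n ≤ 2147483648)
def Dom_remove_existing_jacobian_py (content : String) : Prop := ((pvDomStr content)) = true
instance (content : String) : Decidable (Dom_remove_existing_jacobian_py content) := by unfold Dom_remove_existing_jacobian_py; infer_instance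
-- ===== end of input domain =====

-- B replaces A's carried skip-flag state machine by a block-consuming loop that, on a
-- 'jacobian:' header, eats the whole blank/indented continuation block at once (alternative decomposition).

-- ===== PORT A =====
-- A's loop body: carries (result, skip) through every line
def pvStepA (st : List String × Bool) (line : String) : List String × Bool :=
  if PySem.Str.startswith line "jacobian:" then (st.1, true)
  else
    let skip := if st.2 && !(line == "") && !(PySem.Str.startswith line " ") then false else st.2
    if skip then (st.1, skip) else (st.1 ++ [line], skip)

-- A's trailing-blank trim: `while result and not result[-1].strip(): result.pop()`
def pvTrimA (r : List String) : List String :=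
  match h : r.getLast? with
  | some l => if PySem.Str.strip l = "" then pvTrimA r.dropLast else r
  | none => r
termination_by r.length
decreasing_by
  have hne : r ≠ [] := by intro he; subst he; simp at h
  have := List.length_pos_of_ne_nil hne
  simp [List.length_dropLast]; omega

def remove_existing_jacobian_py (content : String) : String :=
  let lines := PySem.Str.splitlines content
  let st := lines.foldl pvStepA ([], false)
  PySem.Str.join "\n" (pvTrimA st.1)

-- ===== PORT B =====
-- predicate of Source B's inner consume loop: `not lines[i] or lines[i].startswith(' ')`
def pvBlankOrIndent (l : String) : Bool := (l == "") || PySem.Str.startswith l " "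

-- Source B's outer `while i < n` loop, as recursion on the remaining suffix of lines
def pvGoB : List String → List String
  | [] => []
  | l :: rest =>
    if PySem.Str.startswith l "jacobian:" then pvGoB (rest.dropWhile pvBlankOrIndent)
    else l :: pvGoB rest
termination_by ls => ls.length
decreasing_by
  · have := List.length_dropWhile_le pvBlankOrIndent rest
    simp; omega
  · simp

def remove_existing_jacobian_py_alt (content : String) : String :=
  let result := pvGoB (PySem.Str.splitlines content)
  -- Source B's trailing trim: count trailing blank lines from the end, keep the prefix before them
  PySem.Str.join "\n" ((result.reverse.dropWhile (fun s => PySem.Str.strip s == "")).reverse)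

-- ===== PRECONDITION & SPEC =====
def Spec_remove_existing_jacobian_py (content : String) (out : String) : Prop := out = remove_existing_jacobian_py_alt content
instance (content : String) (out : String) : Decidable (Spec_remove_existing_jacobian_py content out) := by unfold Spec_remove_existing_jacobian_py; infer_instance

-- ===== CLAIM (what is proved, stated in full; the proofs are below) =====
def Claim_equal_remove_existing_jacobian_py : Prop := ∀ (content : String), Dom_remove_existing_jacobian_py content → Spec_remove_existing_jacobian_py content (remove_existing_jacobian_py content)

-- ===== LEMMAS AND PROOFS =====

-- a line starting with "jacobian:" is neither blank nor indented
lemma blankOrIndent_of_jacobian (l : String) (h : PySem.Str.startswith l "jacobian:" = true) :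
    pvBlankOrIndent l = false := by
  simp only [PySem.Str.startswith_eq] at h
  rw [PySem.Chars.startswith_iff] at h
  unfold pvBlankOrIndent
  rcases h with ⟨t, ht⟩
  have hne : l.toList = 'j' :: ('a' :: 'c' :: 'o' :: 'b' :: 'i' :: 'a' :: 'n' :: ':' :: t) := by
    simpa using ht.symm
  have h1 : (l == "") = false := by
    rw [beq_eq_false_iff_ne]
    intro he; rw [he] at hne; simp at hne
  have h2 : PySem.Str.startswith l " " = false := by
    rw [← Bool.not_eq_true, PySem.Str.startswith_eq, PySem.Chars.startswith_iff]
    intro hp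
    rw [hne] at hp
    have hsp : " ".toList = [' '] := rfl
    rw [hsp] at hp
    rcases hp with ⟨t2, ht2⟩
    simp at ht2
  show ((l == "") || PySem.Str.startswith l " ") = false
  rw [h1, h2]
  rfl

-- A's skip-flag fold equals B's block-consuming recursion
lemma foldl_stepA_eq (lines : List String) : ∀ (acc : List String) (skip : Bool),
    (lines.foldl pvStepA (acc, skip)).1 =
      acc ++ (if skip then pvGoB (lines.dropWhile pvBlankOrIndent) else pvGoB lines) := by
  induction lines with
  | nil => intro acc skip; cases skip <;> simp [pvGoB]
  | cons l rest ih =>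
    intro acc skip
    by_cases hj : PySem.Str.startswith l "jacobian:" = true
    · have hp := blankOrIndent_of_jacobian l hj
      have hgo : pvGoB (l :: rest) = pvGoB (rest.dropWhile pvBlankOrIndent) := by
        rw [pvGoB, if_pos hj]
      simp only [List.foldl_cons, pvStepA, hj, if_true]
      rw [ih]
      cases skip <;> simp [List.dropWhile_cons, hp, hgo]
    · have hgo : pvGoB (l :: rest) = l :: pvGoB rest := by
        rw [pvGoB, if_neg hj]
      cases skip with
      | false =>
        simp only [List.foldl_cons, pvStepA, hj, if_false, Bool.false_and]
        rw [ih]; simp [hgo]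
      | true =>
        by_cases hq : pvBlankOrIndent l = true
        · have hc : (true && !(l == "") && !(PySem.Str.startswith l " ")) = false := by
            unfold pvBlankOrIndent at hq
            rcases Bool.or_eq_true_iff.mp hq with h | h
            · simp [h]
            · simp only [PySem.Str.startswith_eq, show " ".toList = [' '] from rfl] at h ⊢
              simp [h]
          simp only [List.foldl_cons, pvStepA, hj, if_false, hc]
          rw [ih]
          simp [List.dropWhile_cons, hq]
        · have hq' : pvBlankOrIndent l = false := by simpa using hq
          have h1 : (l == "") = false := by
            unfold pvBlankOrIndent at hq'; simp at hq'; simp [hq'.1]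
          have h2 : PySem.Str.startswith l " " = false := by
            unfold pvBlankOrIndent at hq'; simp at hq'; simpa using hq'.2
          simp only [List.foldl_cons, pvStepA, hj, if_false, h1, h2]
          rw [ih]
          simp [List.dropWhile_cons, hq', hgo]

-- A's pop-while-blank trim equals B's reverse/dropWhile/reverse trim
lemma trimA_eq_rev (l : List String) :
    pvTrimA l.reverse = (l.dropWhile (fun s => PySem.Str.strip s == "")).reverse := by
  induction l with
  | nil => rw [pvTrimA]; simp
  | cons x xs ih =>
    rw [List.reverse_cons, pvTrimA]
    split
    next l h =>
      rw [List.getLast?_concat] at h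
      injection h with h; subst h
      by_cases hx : PySem.Str.strip x = ""
      · rw [if_pos hx, List.dropLast_concat, ih]
        simp [List.dropWhile_cons, hx]
      · rw [if_neg hx]
        simp [List.dropWhile_cons, hx]
    next h =>
      rw [List.getLast?_concat] at h
      exact absurd h (by simp)

-- ===== VERDICT (by name: the statement is the Claim_ definition above) =====
theorem remove_existing_jacobian_py_spec : Claim_equal_remove_existing_jacobian_py := by
  intro content _
  unfold Spec_remove_existing_jacobian_py remove_existing_jacobian_py remove_existing_jacobian_py_alt
  simp only
  rw [foldl_stepA_eq]
  have := trimA_eq_rev (pvGoB (PySem.Str.splitlines content)).reverse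
  simp only [List.reverse_reverse] at this
  simp [this]
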